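-- pv_equiv track=rewrite | github.com/timurmd/borsa-takip | fon_guncelle.py | is_blocked_response
-- ===== SOURCE A (Python) =====
-- def is_blocked_response(html):
--     markers = [
--         "Please enable JavaScript",
--         "support ID",
--         "Access Denied",
--         "Forbidden",
--         "captcha",
--         "robot",
--         "human",
--     ]
--     html_lower = html.lower()
--     return any(m.lower() in html_lower for m in markers)
-- ===== SOURCE B (Python) =====
-- _MARKERS = (
--     "please enable javascript",
--     "support id",
--     "access denied",
--     "forbidden",
--     "captcha",
--     "robot",
--     "human",
-- )
--
-- def is_blocked_response(html):
--     # single left-to-right scan: at each position, try all markers at once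
--     h = html.lower()
--     for i in range(len(h)):
--         for m in _MARKERS:
--             if h.startswith(m, i):
--                 return True
--     return False
-- ===== Notes on version B (the rewrite author's own statement) =====
-- stated objective: alternative
-- what changed: Seven independent substring searches over the lowered HTML are replaced by one left-to-right scan that at each position tries all seven pre-lowered markers as prefixes.
import Mathlib
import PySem

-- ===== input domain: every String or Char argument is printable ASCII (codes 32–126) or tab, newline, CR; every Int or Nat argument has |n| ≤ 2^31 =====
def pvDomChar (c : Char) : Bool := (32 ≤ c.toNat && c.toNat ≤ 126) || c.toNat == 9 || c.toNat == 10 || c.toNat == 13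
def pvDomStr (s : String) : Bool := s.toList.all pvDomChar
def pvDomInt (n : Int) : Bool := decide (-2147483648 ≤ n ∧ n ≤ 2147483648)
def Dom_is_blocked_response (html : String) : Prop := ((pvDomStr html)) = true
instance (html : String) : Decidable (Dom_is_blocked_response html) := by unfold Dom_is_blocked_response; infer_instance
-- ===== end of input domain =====

-- B replaces A's seven independent substring searches by one left-to-right scan that
-- tries all (pre-lowered) markers at each position (objective: alternative; not faster).

-- ===== PORT A =====
def pvMarkers_A : List String :=
  ["Please enable JavaScript", "support ID", "Access Denied", "Forbidden",
   "captcha", "robot", "human"]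

def is_blocked_response (html : String) : Bool :=
  let html_lower := PySem.Str.lower html
  pvMarkers_A.any (fun m => PySem.Str.isIn (PySem.Str.lower m) html_lower)

-- ===== PORT B =====
def pvMarkers_B : List (List Char) :=
  ["please enable javascript".toList, "support id".toList, "access denied".toList,
   "forbidden".toList, "captcha".toList, "robot".toList, "human".toList]

def is_blocked_response_alt (html : String) : Bool :=
  let h := PySem.Chars.lower html.toList
  (List.range h.length).any (fun i =>
    pvMarkers_B.any (fun m => PySem.Chars.startswith (h.drop i) m))

-- ===== PRECONDITION & SPEC =====
def Spec_is_blocked_response (html : String) (out : Bool) : Prop := out = is_blocked_response_alt html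
instance (html : String) (out : Bool) : Decidable (Spec_is_blocked_response html out) := by unfold Spec_is_blocked_response; infer_instance

-- ===== CLAIM (what is proved, stated in full; the proofs are below) =====
def Claim_equal_is_blocked_response : Prop := ∀ (html : String), Dom_is_blocked_response html → Spec_is_blocked_response html (is_blocked_response html)

-- ===== LEMMAS AND PROOFS =====

-- one nonempty marker: B's bounded positional scan finds it iff it is a substring
lemma scan_iff (s sub : List Char) (hne : sub ≠ []) :
    ((∃ i ∈ List.range s.length, sub <+: s.drop i) ↔ sub <:+: s) := by
  rw [← PySem.Chars.isIn_iff_infix, ← PySem.Chars.exists_prefix_drop_iff_isIn]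
  constructor
  · rintro ⟨i, _, hp⟩; exact ⟨i, hp⟩
  · rintro ⟨j, hp⟩
    refine ⟨j, List.mem_range.mpr ?_, hp⟩
    by_contra hj
    have hdrop : s.drop j = [] := List.drop_eq_nil_of_le (by omega)
    rw [hdrop] at hp
    exact hne (List.prefix_nil.mp hp)

theorem is_blocked_response_equal (html : String) :
    is_blocked_response html = is_blocked_response_alt html := by
  apply Bool.eq_iff_iff.mpr
  unfold is_blocked_response is_blocked_response_alt pvMarkers_A pvMarkers_B
  simp only [List.any_eq_true, List.mem_cons, List.not_mem_nil, or_false,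
    PySem.Str.isIn_eq, PySem.Str.lower, String.toList_ofList,
    PySem.Chars.isIn_iff_infix, PySem.Chars.startswith_iff]
  constructor
  · rintro ⟨m, hm, hinf⟩
    have hne : PySem.Chars.lower m.toList ≠ [] := by
      rcases hm with rfl | rfl | rfl | rfl | rfl | rfl | rfl <;> decide
    obtain ⟨i, hi, hp⟩ := (scan_iff _ _ hne).mpr hinf
    refine ⟨i, hi, PySem.Chars.lower m.toList, ?_, hp⟩
    rcases hm with rfl | rfl | rfl | rfl | rfl | rfl | rfl <;> decide
  · rintro ⟨i, hi, m, hm, hp⟩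
    have hne : m ≠ [] := by
      rcases hm with rfl | rfl | rfl | rfl | rfl | rfl | rfl <;> decide
    have hinf := (scan_iff _ m hne).mp ⟨i, hi, hp⟩
    rcases hm with rfl | rfl | rfl | rfl | rfl | rfl | rfl
    · exact ⟨"Please enable JavaScript", by tauto,
        by rw [(by decide : PySem.Chars.lower "Please enable JavaScript".toList = "please enable javascript".toList)]; exact hinf⟩
    · exact ⟨"support ID", by tauto,
        by rw [(by decide : PySem.Chars.lower "support ID".toList = "support id".toList)]; exact hinf⟩
    · exact ⟨"Access Denied", by tauto,
        by rw [(by decide : PySem.Chars.lower "Access Denied".toList = "access denied".toList)]; exact hinf⟩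
    · exact ⟨"Forbidden", by tauto,
        by rw [(by decide : PySem.Chars.lower "Forbidden".toList = "forbidden".toList)]; exact hinf⟩
    · exact ⟨"captcha", by tauto,
        by rw [(by decide : PySem.Chars.lower "captcha".toList = "captcha".toList)]; exact hinf⟩
    · exact ⟨"robot", by tauto,
        by rw [(by decide : PySem.Chars.lower "robot".toList = "robot".toList)]; exact hinf⟩
    · exact ⟨"human", by tauto,
        by rw [(by decide : PySem.Chars.lower "human".toList = "human".toList)]; exact hinf⟩

-- ===== VERDICT (by name: the statement is the Claim_ definition above) =====
theorem is_blocked_response_spec : Claim_equal_is_blocked_response := by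
  intro html _
  exact is_blocked_response_equal html
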